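-- pv_equiv track=rewrite | github.com/jmchandonia/CORAL | convert/spark-minio/convert_bricks.py | _build_description_and_unit
-- ===== SOURCE A (Python) =====
-- from typing import Dict, List, Tuple, Union, Optional, Set
--
-- def _build_description_and_unit(
--     var_name: str,
--     extra: List[Dict[str, str]],
-- ) -> Tuple[str, Optional[str]]:
--     """
--     Build a description string for the column and extract the unit if present.
--
--     Format: "Variable Name, Field1=Value1, Field2=Value2"
--     All consecutive pairs of extra fields are paired as name=value.
--     If there's an unpaired field at the end, it's treated as the unit.
--
--     Returns:
--         Tuple of (description, unit)
--     """
--     parts = [var_name]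
--     unit = None
--
--     # Process extra fields in pairs
--     i = 0
--     while i < len(extra):
--         if i + 1 < len(extra):
--             # Pair this field with the next one
--             parts.append(f"{extra[i]['name']}={extra[i + 1]['name']}")
--             i += 2
--         else:
--             # Unpaired field at the end - this is the unit
--             unit = extra[i]['name']
--             i += 1
--
--     description = ", ".join(parts)
--     return description, unit
-- ===== SOURCE B (Python) =====
-- from typing import Dict, List, Tuple, Optional
--
--
-- def _build_description_and_unit(
--     var_name: str,
--     extra: List[Dict[str, str]],
-- ) -> Tuple[str, Optional[str]]:
--     names = [e['name'] for e in extra]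
--     unit = names.pop() if len(names) % 2 == 1 else None
--     pairs = [f"{a}={b}" for a, b in zip(names[::2], names[1::2])]
--     return ", ".join([var_name] + pairs), unit
-- ===== Notes on version B (the rewrite author's own statement) =====
-- stated objective: idiomatic
-- what changed: Replaces the index-stepping while-loop with an in-loop trailing case by a projection of all names, a parity pop of the trailing unit, and a zip of the two interleaved slices.
import Mathlib
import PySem

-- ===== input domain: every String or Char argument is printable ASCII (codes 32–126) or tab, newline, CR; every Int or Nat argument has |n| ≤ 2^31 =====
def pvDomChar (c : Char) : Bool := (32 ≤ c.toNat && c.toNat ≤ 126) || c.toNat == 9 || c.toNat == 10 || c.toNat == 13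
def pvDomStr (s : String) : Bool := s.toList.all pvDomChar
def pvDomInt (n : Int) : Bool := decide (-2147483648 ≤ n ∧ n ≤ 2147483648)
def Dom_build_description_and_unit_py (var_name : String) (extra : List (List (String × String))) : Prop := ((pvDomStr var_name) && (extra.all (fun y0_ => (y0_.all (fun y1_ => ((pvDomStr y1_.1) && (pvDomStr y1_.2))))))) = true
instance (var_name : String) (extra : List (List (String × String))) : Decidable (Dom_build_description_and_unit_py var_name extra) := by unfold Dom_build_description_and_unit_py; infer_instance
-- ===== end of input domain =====

-- B builds the same value by projecting names, a parity pop of the trailing unit, and zipping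
-- the interleaved slices, instead of A's index-stepping loop with an in-loop trailing case (idiomatic).

-- ===== PORT A =====
-- e['name'] : dict lookup = first match; default "" is never hit under Pre_ (missing key = KeyError).
def pvNameA (e : List (String × String)) : String := (e.lookup "name").getD ""

-- the while-loop over i: structural recursion consuming the remaining suffix two at a time,
-- carrying (parts, unit) exactly as A does
def pvLoopA (parts : List String) (unit : Option String) : List (List (String × String)) → List String × Option String
  | e1 :: e2 :: rest => pvLoopA (parts ++ [pvNameA e1 ++ "=" ++ pvNameA e2]) unit rest
  | [e] => (parts ++ [], some (pvNameA e))
  | [] => (parts, unit)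

def build_description_and_unit_py (var_name : String) (extra : List (List (String × String))) : String × Option String :=
  let (parts, unit) := pvLoopA [var_name] none extra
  (PySem.Str.join ", " parts, unit)

-- ===== PORT B =====
def pvNameB (e : List (String × String)) : String := (e.lookup "name").getD ""

-- hand port of names[::2] (PySem.List.slice has no step); names[1::2] is pvEveryOther names.tail
def pvEveryOther : List String → List String
  | [] => []
  | [a] => [a]
  | a :: _ :: rest => a :: pvEveryOther rest

def build_description_and_unit_py_alt (var_name : String) (extra : List (List (String × String))) : String × Option String :=
  let names := extra.map pvNameB
  -- names.pop() if len(names) % 2 == 1 else None : pop = last element, then dropLast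
  let unit : Option String := if names.length % 2 == 1 then some (PySem.List.pyGetD names (-1) "") else none
  let names := if names.length % 2 == 1 then names.dropLast else names
  let pairs := (List.zip (pvEveryOther names) (pvEveryOther names.tail)).map (fun p => p.1 ++ "=" ++ p.2)
  (PySem.Str.join ", " (var_name :: pairs), unit)

-- ===== PRECONDITION & SPEC =====
-- A raises KeyError when some dict in extra lacks the key 'name'; exactly those inputs are excluded.
def Pre_build_description_and_unit_py (var_name : String) (extra : List (List (String × String))) : Prop :=
  ∀ e ∈ extra, (e.lookup "name").isSome
instance (var_name : String) (extra : List (List (String × String))) : Decidable (Pre_build_description_and_unit_py var_name extra) := by unfold Pre_build_description_and_unit_py; infer_instance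

def pvWitness_build_description_and_unit_py : String × (List (List (String × String))) :=
  ("v", [[("name", "a")], [("name", "b")], [("name", "cm")]])

def Spec_build_description_and_unit_py (var_name : String) (extra : List (List (String × String))) (out : String × Option String) : Prop := out = build_description_and_unit_py_alt var_name extra
instance (var_name : String) (extra : List (List (String × String))) (out : String × Option String) : Decidable (Spec_build_description_and_unit_py var_name extra out) := by unfold Spec_build_description_and_unit_py; infer_instance

-- ===== CLAIM (what is proved, stated in full; the proofs are below) =====
def Claim_equal_build_description_and_unit_py : Prop := ∀ (var_name : String) (extra : List (List (String × String))), Dom_build_description_and_unit_py var_name extra → Pre_build_description_and_unit_py var_name extra → Spec_build_description_and_unit_py var_name extra (build_description_and_unit_py var_name extra)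

-- ===== LEMMAS AND PROOFS =====

-- canonical forms of what each side computes, on the projected name list
def pvPairs : List String → List String
  | a :: b :: rest => (a ++ "=" ++ b) :: pvPairs rest
  | _ => []

def pvUnit : List String → Option String
  | [] => none
  | [a] => some a
  | _ :: _ :: rest => pvUnit rest

theorem pvNameB_eq : pvNameB = pvNameA := rfl

-- two-step induction scheme on the dict list (proof helper only)
def pvUnitDicts : List (List (String × String)) → Option String
  | [] => none
  | [_] => some ""
  | _ :: _ :: rest => pvUnitDicts rest

theorem pvLoopA_eq (l : List (List (String × String))) :
    ∀ parts, pvLoopA parts none l =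
      (parts ++ pvPairs (l.map pvNameA), pvUnit (l.map pvNameA)) := by
  induction l using pvUnitDicts.induct with
  | case1 => intro parts; simp [pvLoopA, pvPairs, pvUnit]
  | case2 e => intro parts; simp [pvLoopA, pvPairs, pvUnit]
  | case3 e1 e2 rest ih =>
      intro parts
      simp only [pvLoopA, List.map, pvPairs, ih]
      simp [pvUnit]

theorem pvEveryOther_cons (b : String) (rest : List String) :
    pvEveryOther (b :: rest) = b :: pvEveryOther rest.tail := by
  cases rest <;> simp [pvEveryOther]

theorem pvZip_eq (ns : List String) :
    (List.zip (pvEveryOther ns) (pvEveryOther ns.tail)).map (fun p => p.1 ++ "=" ++ p.2) = pvPairs ns := by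
  induction ns using pvEveryOther.induct with
  | case1 => simp [pvEveryOther, pvPairs]
  | case2 a => simp [pvEveryOther, pvPairs]
  | case3 a b rest ih =>
      simp only [List.tail_cons, pvEveryOther, pvEveryOther_cons, List.zip_cons_cons,
        List.map_cons, pvPairs]
      exact congrArg _ ih

theorem pvPairs_dropLast (ns : List String) (h : ns.length % 2 = 1) :
    pvPairs ns.dropLast = pvPairs ns := by
  induction ns using pvEveryOther.induct with
  | case1 => simp at h
  | case2 a => simp [pvPairs]
  | case3 a b rest ih =>
      have hr : rest.length % 2 = 1 := by simp at h; omega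
      have hne : rest ≠ [] := by intro he; rw [he] at hr; simp at hr
      have : (a :: b :: rest).dropLast = a :: b :: rest.dropLast := by
        simp [List.dropLast_cons_of_ne_nil, hne]
      rw [this]
      simp only [pvPairs]
      exact congrArg _ (ih hr)

theorem pvUnit_eq (ns : List String) :
    pvUnit ns = if ns.length % 2 = 1 then some (ns.getLastD "") else none := by
  induction ns using pvEveryOther.induct with
  | case1 => simp [pvUnit]
  | case2 a => simp [pvUnit]
  | case3 a b rest ih =>
      cases rest with
      | nil => simp [pvUnit]
      | cons c t =>
        simp only [pvUnit, ih]
        have : (c :: t).getLastD "" = (a :: b :: c :: t).getLastD "" := by simp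
        have hl : (a :: b :: c :: t).length % 2 = (c :: t).length % 2 := by simp; omega
        rw [hl, this]

-- ===== VERDICT (by name: the statement is the Claim_ definition above) =====
theorem build_description_and_unit_py_spec : Claim_equal_build_description_and_unit_py := by
  intro var_name extra _ _
  unfold Spec_build_description_and_unit_py
  unfold build_description_and_unit_py build_description_and_unit_py_alt
  rw [pvNameB_eq, pvLoopA_eq]
  set ns := extra.map pvNameA with hns
  simp only []
  by_cases hodd : ns.length % 2 = 1
  · have hne : ns ≠ [] := by intro he; rw [he] at hodd; simp at hodd
    rw [PySem.List.pyGetD_neg_one _ "" hne]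
    simp only [hodd, if_pos, beq_iff_eq, pvUnit_eq, pvZip_eq, pvPairs_dropLast ns hodd]
    simp [List.getLastD_eq_getLast?, List.getLast?_eq_some_getLast hne]
  · simp [pvUnit_eq, pvZip_eq, hodd]
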